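-- pv_equiv track=rewrite | github.com/Smartin0312/boletines | trabajo_Programacion_Modular_lll/ejercicio6.py | buscar_palabra
-- ===== SOURCE A (Python) =====
-- def buscar_palabra(palabra_buscar, lista):
--     encontrada=False
--
--     c=0
--     c2=0
--     while c<(len(lista)):
--         if c2<len(palabra_buscar) and palabra_buscar[c2]==lista[c]:
--
--             c2+=1
--         c+=1
--     if c2==len(palabra_buscar):
--         encontrada=True
--     return encontrada
-- ===== SOURCE B (Python) =====
-- def buscar_palabra(palabra_buscar, lista):
--     # Build an inverted index: element -> list of its positions (increasing).
--     posiciones = {}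
--     for i, x in enumerate(lista):
--         posiciones.setdefault(x, []).append(i)
--     # Greedy match: for each pattern character, take its first occurrence
--     # at or after 'siguiente'; lista itself is never scanned while matching.
--     siguiente = 0
--     for ch in palabra_buscar:
--         j = next((i for i in posiciones.get(ch, []) if i >= siguiente), None)
--         if j is None:
--             return False
--         siguiente = j + 1
--     return True
-- ===== Notes on version B (the rewrite author's own statement) =====
-- stated objective: alternative
-- what changed: B builds an inverted occurrence index (element -> sorted position list) in one pass, then matches each pattern character by searching only that character's own position list for the first position at or after the cursor, instead of A's single counter-driven scan of lista with a second pointer into the pattern.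
import Mathlib
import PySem

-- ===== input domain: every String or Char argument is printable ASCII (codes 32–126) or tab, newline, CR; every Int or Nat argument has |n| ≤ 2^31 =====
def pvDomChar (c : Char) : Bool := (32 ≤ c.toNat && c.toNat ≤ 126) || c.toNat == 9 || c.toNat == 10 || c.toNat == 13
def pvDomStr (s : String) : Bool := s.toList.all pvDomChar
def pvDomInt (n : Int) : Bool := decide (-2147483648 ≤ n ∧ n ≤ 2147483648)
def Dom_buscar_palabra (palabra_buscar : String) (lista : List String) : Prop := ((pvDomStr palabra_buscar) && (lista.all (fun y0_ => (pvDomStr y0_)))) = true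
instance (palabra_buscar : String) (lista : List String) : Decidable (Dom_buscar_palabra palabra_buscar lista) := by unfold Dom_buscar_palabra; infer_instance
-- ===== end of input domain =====

-- B replaces A's counter-driven scan of lista by an inverted occurrence index built once,
-- each pattern character then searches only its own position list (objective: alternative).

-- ===== PORT A =====
-- A: while loop over lista indices (folded left over lista), counter c2 advanced on match.
def buscar_palabra (palabra_buscar : String) (lista : List String) : Bool :=
  let chars := palabra_buscar.toList
  let c2 := lista.foldl (fun c2 x =>
    match chars[c2]? with
    | some ch => if String.ofList [ch] = x then c2 + 1 else c2
    | none => c2) 0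
  c2 == chars.length

-- ===== PORT B =====
-- 'for i, x in enumerate(lista): posiciones.setdefault(x, []).append(i)'
-- (zipIdx is enumerate with the pair swapped; indices are the nonnegative ints 0..n-1, kept as Nat)
def pvBuild (lista : List String) : PySem.Dict String (List Nat) :=
  (lista.zipIdx).foldl (fun d p => d.modify p.1 [] (fun l => l ++ [p.2])) PySem.Dict.empty

-- 'next((i for i in idxs if i >= siguiente), None)'
def pvFindGE (s : Nat) : List Nat → Option Nat
  | [] => none
  | i :: rest => if s ≤ i then some i else pvFindGE s rest

-- 'for ch in palabra_buscar: …' with early return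
def pvMatch (pos : PySem.Dict String (List Nat)) : List Char → Nat → Bool
  | [], _ => true
  | ch :: rest, s =>
    match pvFindGE s (pos.getD (String.ofList [ch]) []) with
    | some j => pvMatch pos rest (j + 1)
    | none => false

def buscar_palabra_alt (palabra_buscar : String) (lista : List String) : Bool :=
  pvMatch (pvBuild lista) palabra_buscar.toList 0

-- ===== PRECONDITION & SPEC =====
def Spec_buscar_palabra (palabra_buscar : String) (lista : List String) (out : Bool) : Prop := out = buscar_palabra_alt palabra_buscar lista
instance (palabra_buscar : String) (lista : List String) (out : Bool) : Decidable (Spec_buscar_palabra palabra_buscar lista out) := by unfold Spec_buscar_palabra; infer_instance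

-- ===== CLAIM (what is proved, stated in full; the proofs are below) =====
def Claim_equal_buscar_palabra : Prop := ∀ (palabra_buscar : String) (lista : List String), Dom_buscar_palabra palabra_buscar lista → Spec_buscar_palabra palabra_buscar lista (buscar_palabra palabra_buscar lista)

-- ===== LEMMAS AND PROOFS =====

-- intermediate greedy form: consume the first occurrence, pattern-driven
def pvConsume (x0 : String) : List String → Option (List String)
  | [] => none
  | y :: ys => if y = x0 then some ys else pvConsume x0 ys

def pvAllIn : List Char → List String → Bool
  | [], _ => true
  | ch :: rest, l =>
    match pvConsume (String.ofList [ch]) l with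
    | some l' => pvAllIn rest l'
    | none => false

-- step function of A's fold
def pvStep (chars : List Char) (c2 : Nat) (x : String) : Nat :=
  match chars[c2]? with
  | some ch => if String.ofList [ch] = x then c2 + 1 else c2
  | none => c2

theorem pvStep_sat (chars : List Char) (x : String) :
    pvStep chars chars.length x = chars.length := by
  simp [pvStep]

-- A's fold equals the pattern-driven consume form
theorem pvA_key (chars : List Char) (l : List String) (c2 : Nat) (h : c2 ≤ chars.length) :
    (l.foldl (pvStep chars) c2 == chars.length) = pvAllIn (chars.drop c2) l := by
  induction l generalizing c2 with
  | nil =>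
    rcases Nat.lt_or_ge c2 chars.length with hlt | hge
    · have hd : chars.drop c2 = chars[c2] :: chars.drop (c2 + 1) := List.drop_eq_getElem_cons hlt
      rw [hd]
      simp only [List.foldl, pvAllIn, pvConsume]
      have : c2 ≠ chars.length := Nat.ne_of_lt hlt
      simp [this]
    · have hc : c2 = chars.length := le_antisymm h hge
      subst hc
      simp [pvAllIn, List.foldl, List.drop_length]
  | cons x xs ih =>
    rcases Nat.lt_or_ge c2 chars.length with hlt | hge
    · have hd : chars.drop c2 = chars[c2] :: chars.drop (c2 + 1) := List.drop_eq_getElem_cons hlt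
      have hget : chars[c2]? = some chars[c2] := List.getElem?_eq_getElem hlt
      by_cases hm : String.ofList [chars[c2]] = x
      · have hs : pvStep chars c2 x = c2 + 1 := by simp [pvStep, hget, hm]
        simp only [List.foldl, hs]
        rw [ih (c2 + 1) hlt, hd]
        simp [pvAllIn, pvConsume, hm]
      · have hs : pvStep chars c2 x = c2 := by simp [pvStep, hget, hm]
        simp only [List.foldl, hs]
        rw [ih c2 h, hd]
        simp [pvAllIn, pvConsume, Ne.symm hm]
    · have hc : c2 = chars.length := le_antisymm h hge
      subst hc
      simp only [List.foldl, pvStep_sat]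
      rw [ih chars.length le_rfl]
      simp [List.drop_length, pvAllIn]

-- specification of the occurrence lists the index holds
def pvOcc (x : String) (l : List String) (b : Nat) : List Nat :=
  ((l.zipIdx b).filter (fun p => p.1 == x)).map (·.2)

theorem pvBuild_getD (lista : List String) (x : String) :
    (pvBuild lista).getD x [] = pvOcc x lista 0 := by
  unfold pvBuild pvOcc
  rw [PySem.Dict.getD_foldl_modify_append]
  simp [PySem.Dict.getD_empty]

theorem pvOcc_cons (x y : String) (ys : List String) (b : Nat) :
    pvOcc x (y :: ys) b =
      if y = x then b :: pvOcc x ys (b + 1) else pvOcc x ys (b + 1) := by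
  unfold pvOcc
  by_cases h : y = x <;> simp [List.zipIdx_cons, h]

theorem pvOcc_mem_ge (x : String) (l : List String) (b j : Nat) (h : j ∈ pvOcc x l b) :
    b ≤ j := by
  induction l generalizing b with
  | nil => simp [pvOcc] at h
  | cons y ys ih =>
    rw [pvOcc_cons] at h
    by_cases hy : y = x
    · simp [hy] at h
      rcases h with h | h
      · omega
      · have := ih (b + 1) h; omega
    · simp [hy] at h
      have := ih (b + 1) h; omega

theorem pvFindGE_shift (l : List Nat) (s t : Nat) (hst : s ≤ t)
    (hall : ∀ j ∈ l, t ≤ j) : pvFindGE s l = pvFindGE t l := by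
  cases l with
  | nil => rfl
  | cons i rest =>
    have hi : t ≤ i := hall i (by simp)
    simp [pvFindGE, Nat.le_trans hst hi, hi]

-- the crux: searching the occurrence list from s = consuming the first occurrence in the suffix
theorem pvL (l : List String) (x : String) (b s : Nat) (hbs : b ≤ s) :
    match pvFindGE s (pvOcc x l b) with
    | some j => b ≤ j ∧ pvConsume x (l.drop (s - b)) = some (l.drop (j + 1 - b))
    | none => pvConsume x (l.drop (s - b)) = none := by
  induction l generalizing b s with
  | nil => simp [pvOcc, pvFindGE, pvConsume]
  | cons y ys ih =>
    rw [pvOcc_cons]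
    by_cases hy : y = x
    · rw [if_pos hy]
      by_cases hsb : s ≤ b
      · have hsb' : s = b := le_antisymm hsb hbs
        subst hsb'
        simp [pvFindGE, pvConsume, hy]
      · have h1 : b + 1 ≤ s := by omega
        have hskip : pvFindGE s (b :: pvOcc x ys (b + 1)) = pvFindGE s (pvOcc x ys (b + 1)) := by
          simp [pvFindGE, hsb]
        rw [hskip]
        have := ih (b + 1) s h1
        cases hfe : pvFindGE s (pvOcc x ys (b + 1)) with
        | some j =>
          rw [hfe] at this
          obtain ⟨hbj, hcons⟩ := this
          refine ⟨by omega, ?_⟩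
          have hd1 : (y :: ys).drop (s - b) = ys.drop (s - (b + 1)) := by
            have : s - b = (s - (b + 1)) + 1 := by omega
            rw [this]; simp
          have hd2 : (y :: ys).drop (j + 1 - b) = ys.drop (j + 1 - (b + 1)) := by
            have : j + 1 - b = (j + 1 - (b + 1)) + 1 := by omega
            rw [this]; simp
          rw [hd1, hd2]; exact hcons
        | none =>
          rw [hfe] at this
          have hd1 : (y :: ys).drop (s - b) = ys.drop (s - (b + 1)) := by
            have : s - b = (s - (b + 1)) + 1 := by omega
            rw [this]; simp
          rw [hd1]; exact this
    · rw [if_neg hy]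
      by_cases hsb : s ≤ b
      · have hsb' : s = b := le_antisymm hsb hbs
        subst hsb'
        have hsh : pvFindGE s (pvOcc x ys (s + 1)) = pvFindGE (s + 1) (pvOcc x ys (s + 1)) :=
          pvFindGE_shift _ s (s + 1) (by omega) (fun j hj => pvOcc_mem_ge x ys (s + 1) j hj)
        rw [hsh]
        have := ih (s + 1) (s + 1) le_rfl
        cases hfe : pvFindGE (s + 1) (pvOcc x ys (s + 1)) with
        | some j =>
          rw [hfe] at this
          obtain ⟨hbj, hcons⟩ := this
          refine ⟨by omega, ?_⟩
          simp only [Nat.sub_self, List.drop_zero] at hcons ⊢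
          have hd2 : (y :: ys).drop (j + 1 - s) = ys.drop (j + 1 - (s + 1)) := by
            have : j + 1 - s = (j + 1 - (s + 1)) + 1 := by omega
            rw [this]; simp
          rw [hd2]
          simpa [pvConsume, hy] using hcons
        | none =>
          rw [hfe] at this
          simp only [Nat.sub_self, List.drop_zero] at this ⊢
          simpa [pvConsume, hy] using this
      · have h1 : b + 1 ≤ s := by omega
        have := ih (b + 1) s h1
        cases hfe : pvFindGE s (pvOcc x ys (b + 1)) with
        | some j =>
          rw [hfe] at this
          obtain ⟨hbj, hcons⟩ := this
          refine ⟨by omega, ?_⟩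
          have hd1 : (y :: ys).drop (s - b) = ys.drop (s - (b + 1)) := by
            have : s - b = (s - (b + 1)) + 1 := by omega
            rw [this]; simp
          have hd2 : (y :: ys).drop (j + 1 - b) = ys.drop (j + 1 - (b + 1)) := by
            have : j + 1 - b = (j + 1 - (b + 1)) + 1 := by omega
            rw [this]; simp
          rw [hd1, hd2]; exact hcons
        | none =>
          rw [hfe] at this
          have hd1 : (y :: ys).drop (s - b) = ys.drop (s - (b + 1)) := by
            have : s - b = (s - (b + 1)) + 1 := by omega
            rw [this]; simp
          rw [hd1]; exact this

theorem pvMain (chars : List Char) (l : List String) (s : Nat) :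
    pvMatch (pvBuild l) chars s = pvAllIn chars (l.drop s) := by
  induction chars generalizing s with
  | nil => simp [pvMatch, pvAllIn]
  | cons ch rest ih =>
    have hL := pvL l (String.ofList [ch]) 0 s (Nat.zero_le s)
    simp only [pvMatch, pvAllIn, pvBuild_getD]
    cases hfe : pvFindGE s (pvOcc (String.ofList [ch]) l 0) with
    | some j =>
      rw [hfe] at hL
      obtain ⟨-, hcons⟩ := hL
      simp only [Nat.sub_zero] at hcons
      rw [hcons]
      exact ih (j + 1)
    | none =>
      rw [hfe] at hL
      simp only [Nat.sub_zero] at hL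
      rw [hL]

-- ===== VERDICT (by name: the statement is the Claim_ definition above) =====
theorem buscar_palabra_spec : Claim_equal_buscar_palabra := by
  intro p l _
  unfold Spec_buscar_palabra buscar_palabra buscar_palabra_alt
  have hA := pvA_key p.toList l 0 (Nat.zero_le _)
  simp only [List.drop_zero] at hA
  rw [pvMain, List.drop_zero]
  simpa [pvStep] using hA
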